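-- pv_equiv track=rewrite | github.com/LooperCode/PythonHW3 | exHard.py | Maxincrement
-- ===== SOURCE A (Python) =====
-- def Maxincrement(listRnd):
--     minPos = maxPos = tempMin = tempMax = 0
--     minCount = maxCount = 0
--     for i in range(len(listRnd)):
--         index = 1
--         tempMin = listRnd[i]
--         while listRnd[i]+index in listRnd:
--             tempMax = listRnd[i]+index
--             minCount = index
--             index += 1
--         if minCount > maxCount:
--             maxCount = minCount
--             maxPos = tempMax
--             minPos = tempMin
--     return minPos, maxPos
-- ===== SOURCE B (Python) =====
-- def Maxincrement(listRnd):
--     s = set(listRnd)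
--     run = {}
--     for v in s:
--         if v - 1 in s:
--             continue
--         e = v
--         while e + 1 in s:
--             e += 1
--         u = v
--         while u <= e:
--             run[u] = e - u
--             u += 1
--     lo = hi = best = 0
--     for v in listRnd:
--         k = run[v]
--         if k > best:
--             lo, hi, best = v, v + k, k
--     return lo, hi
-- ===== Notes on version B (the rewrite author's own statement) =====
-- stated objective: faster
-- what changed: A rescans the whole list for every candidate successor of every element (nested membership scans); B builds a set once, walks each maximal consecutive chain exactly once from its unique start to fill a dict of run lengths, then picks the first strict maximum in one pass over the original list.
import Mathlib
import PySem

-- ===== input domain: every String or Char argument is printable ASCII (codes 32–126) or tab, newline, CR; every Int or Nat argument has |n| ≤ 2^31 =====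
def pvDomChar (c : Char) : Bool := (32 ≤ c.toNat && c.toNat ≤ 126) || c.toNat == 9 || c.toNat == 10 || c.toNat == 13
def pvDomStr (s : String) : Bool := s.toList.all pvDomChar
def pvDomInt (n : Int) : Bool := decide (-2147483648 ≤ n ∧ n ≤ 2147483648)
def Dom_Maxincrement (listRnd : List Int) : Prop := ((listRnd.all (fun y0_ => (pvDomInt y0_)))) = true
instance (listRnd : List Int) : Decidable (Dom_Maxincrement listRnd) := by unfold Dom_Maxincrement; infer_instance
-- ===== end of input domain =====

-- B replaces A's nested whole-list membership rescans by one set, one walk per maximal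
-- consecutive chain filling a run-length dict, and one pass over the list (objective: faster).
-- Python A returns the tuple (minPos, maxPos); both ports return it as the list [minPos, maxPos].

-- ===== PORT A =====
-- inner loop 'while listRnd[i]+index in listRnd: tempMax = …; minCount = index; index += 1';
-- the scanned values base+1, base+2, … are distinct members of listRnd, so the loop makes at
-- most listRnd.length iterations and fuel listRnd.length + 1 is never exhausted.
def MaxincrementWhile (listRnd : List Int) (base : Int) : Int → Int → Int → Nat → Int × Int
  | _, tempMax, minCount, 0 => (tempMax, minCount)
  | index, tempMax, minCount, fuel+1 =>
    if listRnd.contains (base + index) then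
      MaxincrementWhile listRnd base (index + 1) (base + index) index fuel
    else (tempMax, minCount)

-- state = (minPos, maxPos, tempMin, tempMax, minCount, maxCount)
def Maxincrement (listRnd : List Int) : List Int :=
  let st := (PySem.List.pyRange 0 (PySem.List.len listRnd) 1).foldl
    (fun (st : Int × Int × Int × Int × Int × Int) i =>
      let tempMin := PySem.List.pyGetD listRnd i 0   -- listRnd[i]; i ranges over valid indices
      let r := MaxincrementWhile listRnd tempMin 1 st.2.2.2.1 st.2.2.2.2.1 (listRnd.length + 1)
      if r.2 > st.2.2.2.2.2 then (tempMin, r.1, tempMin, r.1, r.2, r.2)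
      else (st.1, st.2.1, tempMin, r.1, r.2, st.2.2.2.2.2))
    (0, 0, 0, 0, 0, 0)
  [st.1, st.2.1]

-- ===== PORT B =====
-- 'e = v; while e + 1 in s: e += 1' — same fuel bound as the A-side loop
def chainEnd (s : List Int) : Int → Nat → Int
  | e, 0 => e
  | e, fuel+1 => if PySem.Set.contains s (e + 1) then chainEnd s (e + 1) fuel else e

-- 'u = v; while u <= e: run[u] = e - u; u += 1'
def fillRun (u e : Int) (d : PySem.Dict Int Int) : PySem.Dict Int Int :=
  if u ≤ e then fillRun (u + 1) e (d.insert u (e - u)) else d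
termination_by (e + 1 - u).toNat
decreasing_by omega

-- the dict 'run' is only looked up afterwards and each key is written exactly once (chains are
-- disjoint), so iterating the set in its list order is exact: the result is order-independent.
def Maxincrement_alt (listRnd : List Int) : List Int :=
  let s : PySem.Set Int := PySem.Set.ofList listRnd
  let run := s.foldl (fun d v =>
      if PySem.Set.contains s (v - 1) then d
      else fillRun v (chainEnd s v (listRnd.length + 1)) d) PySem.Dict.empty
  let r := listRnd.foldl (fun (st : Int × Int × Int) v =>
      let k := run.getD v 0     -- run[v]; the key is always present for v ∈ listRnd
      if k > st.2.2 then (v, v + k, k) else st) (0, 0, 0)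
  [r.1, r.2.1]

-- ===== PRECONDITION & SPEC =====
def Spec_Maxincrement (listRnd : List Int) (out : List Int) : Prop := out = Maxincrement_alt listRnd
instance (listRnd : List Int) (out : List Int) : Decidable (Spec_Maxincrement listRnd out) := by unfold Spec_Maxincrement; infer_instance

-- ===== CLAIM (what is proved, stated in full; the proofs are below) =====
def Claim_equal_Maxincrement : Prop := ∀ (listRnd : List Int), Dom_Maxincrement listRnd → Spec_Maxincrement listRnd (Maxincrement listRnd)

-- ===== LEMMAS AND PROOFS =====

-- number of consecutive successors x, x+1, … present in l (capped by fuel)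
def cnt (l : List Int) : Int → Nat → Nat
  | _, 0 => 0
  | x, f+1 => if l.contains x then cnt l (x+1) f + 1 else 0

-- number of consecutive predecessors x-1, x-2, … present in l (capped by fuel)
def pcnt (l : List Int) : Int → Nat → Nat
  | _, 0 => 0
  | x, f+1 => if l.contains (x-1) then pcnt l (x-1) f + 1 else 0

-- the common reference fold: first strictly improving run wins
def bestStep (l : List Int) (st : Int × Int × Int) (v : Int) : Int × Int × Int :=
  let k : Int := (cnt l (v + 1) (l.length + 1) : Int)
  if k > st.2.2 then (v, v + k, k) else st

theorem cnt_mem (l : List Int) : ∀ (f : Nat) (x : Int) (i : Nat), i < cnt l x f → x + i ∈ l := by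
  intro f
  induction f with
  | zero => intro x i h; simp [cnt] at h
  | succ f ih =>
    intro x i h
    simp only [cnt] at h
    by_cases hx : l.contains x
    · rw [if_pos hx] at h
      cases i with
      | zero => simpa using List.mem_of_elem_eq_true hx
      | succ i =>
        have h2 := ih (x + 1) i (by omega)
        have : x + 1 + (i : Int) = x + ((i : Nat) + 1 : Nat) := by push_cast; ring
        rwa [this] at h2
    · rw [if_neg hx] at h; omega

theorem nodup_subset_length (a b : List Int) (h : a.Nodup) (hs : a ⊆ b) :
    a.length ≤ b.length := by
  calc a.length = a.toFinset.card := (List.toFinset_card_of_nodup h).symm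
    _ ≤ b.toFinset.card := Finset.card_le_card (by intro x hx; simp at hx ⊢; exact hs hx)
    _ ≤ b.length := b.toFinset_card_le

theorem cnt_lt_length (l : List Int) (x : Int) (hx : x ∈ l) (f : Nat) :
    cnt l (x + 1) f < l.length := by
  have hlen := nodup_subset_length
      (x :: (List.range (cnt l (x + 1) f)).map (fun i : Nat => x + 1 + (i : Int))) l ?_ ?_
  · simpa using hlen
  · refine List.nodup_cons.mpr ⟨?_, ?_⟩
    · simp only [List.mem_map, List.mem_range]
      rintro ⟨i, -, hi⟩; omega
    · refine List.Nodup.map ?_ List.nodup_range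
      intro a b hab; simpa using hab
  · intro y hy
    rcases List.mem_cons.mp hy with rfl | hy
    · exact hx
    · obtain ⟨i, hi, rfl⟩ := List.mem_map.mp hy
      exact cnt_mem l f (x + 1) i (List.mem_range.mp hi)

theorem pcnt_mem (l : List Int) : ∀ (f : Nat) (x : Int) (i : Nat), i < pcnt l x f → x - 1 - i ∈ l := by
  intro f
  induction f with
  | zero => intro x i h; simp [pcnt] at h
  | succ f ih =>
    intro x i h
    simp only [pcnt] at h
    by_cases hx : l.contains (x - 1)
    · rw [if_pos hx] at h
      cases i with
      | zero => simpa using List.mem_of_elem_eq_true hx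
      | succ i =>
        have h2 := ih (x - 1) i (by omega)
        have heq : x - 1 - 1 - (i : Int) = x - 1 - ((i : Nat) + 1 : Nat) := by push_cast; ring
        rwa [heq] at h2
    · rw [if_neg hx] at h; omega

theorem pcnt_lt_length (l : List Int) (x : Int) (hx : x ∈ l) (f : Nat) :
    pcnt l x f < l.length := by
  have hlen := nodup_subset_length
      (x :: (List.range (pcnt l x f)).map (fun i : Nat => x - 1 - (i : Int))) l ?_ ?_
  · simpa using hlen
  · refine List.nodup_cons.mpr ⟨?_, ?_⟩
    · simp only [List.mem_map, List.mem_range]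
      rintro ⟨i, -, hi⟩; omega
    · refine List.Nodup.map ?_ List.nodup_range
      intro a b hab; simpa using hab
  · intro y hy
    rcases List.mem_cons.mp hy with rfl | hy
    · exact hx
    · obtain ⟨i, hi, rfl⟩ := List.mem_map.mp hy
      exact pcnt_mem l f x i (List.mem_range.mp hi)

theorem cnt_eq_of_lt_of_le (l : List Int) : ∀ (f g : Nat) (x : Int),
    cnt l x f < f → f ≤ g → cnt l x g = cnt l x f := by
  intro f
  induction f with
  | zero => intro g x h; omega
  | succ f ih =>
    intro g x h hfg
    obtain ⟨g, rfl⟩ : ∃ g', g = g' + 1 := ⟨g - 1, by omega⟩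
    simp only [cnt] at h ⊢
    by_cases hx : l.contains x
    · rw [if_pos hx] at h
      rw [if_pos hx, if_pos hx]
      rw [ih g (x + 1) (by omega) (by omega)]
    · rw [if_neg hx, if_neg hx]

theorem pcnt_eq_of_lt_of_le (l : List Int) : ∀ (f g : Nat) (x : Int),
    pcnt l x f < f → f ≤ g → pcnt l x g = pcnt l x f := by
  intro f
  induction f with
  | zero => intro g x h; omega
  | succ f ih =>
    intro g x h hfg
    obtain ⟨g, rfl⟩ : ∃ g', g = g' + 1 := ⟨g - 1, by omega⟩
    simp only [pcnt] at h ⊢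
    by_cases hx : l.contains (x - 1)
    · rw [if_pos hx] at h
      rw [if_pos hx, if_pos hx]
      rw [ih g (x - 1) (by omega) (by omega)]
    · rw [if_neg hx, if_neg hx]

theorem cnt_next_not_mem (l : List Int) : ∀ (f : Nat) (x : Int),
    cnt l x f < f → x + (cnt l x f : Int) ∉ l := by
  intro f
  induction f with
  | zero => intro x h; omega
  | succ f ih =>
    intro x h
    simp only [cnt] at h ⊢
    by_cases hx : l.contains x
    · rw [if_pos hx] at h ⊢
      have h2 := ih (x + 1) (by omega)
      intro hc; apply h2
      have : x + 1 + (cnt l (x + 1) f : Int) = x + ((cnt l (x + 1) f + 1 : Nat) : Int) := by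
        push_cast; ring
      rwa [this]
    · rw [if_neg hx]
      simpa [List.contains_iff_mem] using hx

theorem cnt_ge (l : List Int) : ∀ (f : Nat) (x : Int) (k : Nat),
    (∀ i : Nat, i < k → x + i ∈ l) → k ≤ f → k ≤ cnt l x f := by
  intro f
  induction f with
  | zero => intro x k _ h; omega
  | succ f ih =>
    intro x k hk hkf
    cases k with
    | zero => omega
    | succ k =>
      have hx : l.contains x := by
        have := hk 0 (by omega); simpa [List.contains_iff_mem] using this
      simp only [cnt, if_pos hx]
      have : k ≤ cnt l (x + 1) f := by
        apply ih (x + 1) k _ (by omega)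
        intro i hi
        have := hk (i + 1) (by omega)
        have heq : x + ((i + 1 : Nat) : Int) = x + 1 + (i : Int) := by push_cast; ring
        rwa [heq] at this
      omega

-- the big-fuel counts, and their one-step recurrences
def C (l : List Int) (x : Int) : Nat := cnt l x (l.length + 1)
def P (l : List Int) (x : Int) : Nat := pcnt l x (l.length + 1)

theorem C_rec (l : List Int) (x : Int) :
    C l x = if x ∈ l then C l (x + 1) + 1 else 0 := by
  unfold C
  by_cases hx : x ∈ l
  · rw [if_pos hx]
    have hc : l.contains x := by simpa [List.contains_iff_mem] using hx
    show cnt l x (l.length + 1) = _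
    rw [show cnt l x (l.length + 1) = if l.contains x = true then cnt l (x+1) l.length + 1 else 0 from rfl]
    rw [if_pos hc]
    rw [cnt_eq_of_lt_of_le l l.length (l.length + 1) (x + 1) (cnt_lt_length l x hx l.length) (by omega)]
  · rw [if_neg hx]
    have hc : ¬ l.contains x := by simpa [List.contains_iff_mem] using hx
    show (if l.contains x = true then cnt l (x+1) l.length + 1 else 0) = 0
    rw [if_neg hc]

theorem P_rec (l : List Int) (x : Int) :
    P l x = if x - 1 ∈ l then P l (x - 1) + 1 else 0 := by
  unfold P
  by_cases hx : x - 1 ∈ l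
  · rw [if_pos hx]
    have hc : l.contains (x - 1) := by simpa [List.contains_iff_mem] using hx
    show pcnt l x (l.length + 1) = _
    rw [show pcnt l x (l.length + 1) = if l.contains (x-1) = true then pcnt l (x-1) l.length + 1 else 0 from rfl]
    rw [if_pos hc]
    rw [pcnt_eq_of_lt_of_le l l.length (l.length + 1) (x - 1) (pcnt_lt_length l (x-1) hx l.length) (by omega)]
  · rw [if_neg hx]
    have hc : ¬ l.contains (x - 1) := by simpa [List.contains_iff_mem] using hx
    show (if l.contains (x-1) = true then pcnt l (x-1) l.length + 1 else 0) = 0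
    rw [if_neg hc]

-- the start of x's chain: x - P x is a member, has no predecessor, and everything between is a member
theorem pcnt_facts (l : List Int) : ∀ (f : Nat) (x : Int), x ∈ l → pcnt l x f < f →
    (x - (pcnt l x f : Int) ∈ l) ∧ (x - (pcnt l x f : Int) - 1 ∉ l) ∧
      (∀ w : Int, x - (pcnt l x f : Int) ≤ w → w ≤ x → w ∈ l) := by
  intro f
  induction f with
  | zero => intro x _ h; omega
  | succ f ih =>
    intro x hx h
    simp only [pcnt] at h ⊢
    by_cases hx1 : l.contains (x - 1)
    · rw [if_pos hx1] at h ⊢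
      have hmem : x - 1 ∈ l := List.mem_of_elem_eq_true hx1
      obtain ⟨h1, h2, h3⟩ := ih (x - 1) hmem (by omega)
      have harith : x - ((pcnt l (x - 1) f + 1 : Nat) : Int) = x - 1 - (pcnt l (x - 1) f : Int) := by
        push_cast; ring
      rw [harith]
      refine ⟨h1, h2, ?_⟩
      intro w hw1 hw2
      rcases eq_or_lt_of_le hw2 with rfl | hlt
      · exact hx
      · exact h3 w hw1 (by omega)
    · rw [if_neg hx1] at h ⊢
      have hmem : x - 1 ∉ l := fun hc => hx1 (by simpa [List.contains_iff_mem] using hc)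
      refine ⟨by simpa using hx, by simpa using hmem, ?_⟩
      intro w hw1 hw2
      have : w = x := by omega
      subst this; exact hx

theorem start_facts (l : List Int) (x : Int) (hx : x ∈ l) :
    x - (P l x : Int) ∈ l ∧ x - (P l x : Int) - 1 ∉ l ∧
      (∀ w : Int, x - (P l x : Int) ≤ w → w ≤ x → w ∈ l) := by
  exact pcnt_facts l (l.length + 1) x hx (by have := pcnt_lt_length l x hx (l.length + 1); omega)

-- a chain walk: if a-1 ∉ l and a..a+n ∈ l then P (a+n) = n
theorem P_chain (l : List Int) (a : Int) (ha : a - 1 ∉ l) :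
    ∀ n : Nat, (∀ i : Nat, i ≤ n → a + i ∈ l) → P l (a + n) = n := by
  intro n
  induction n with
  | zero =>
    intro _
    rw [show a + ((0 : Nat) : Int) = a by push_cast; ring, P_rec, if_neg ha]
  | succ n ih =>
    intro hmem
    have h1 : a + ((n + 1 : Nat) : Int) - 1 = a + (n : Int) := by push_cast; ring
    have h2 : a + (n : Int) ∈ l := by
      have := hmem n (by omega); push_cast at this ⊢; exact this
    rw [P_rec, h1, if_pos h2, ih (fun i hi => hmem i (by omega))]

-- run lengths along a chain: for a ≤ w ≤ a + C(a+1), C (w+1) = a + C(a+1) - w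
theorem C_chain (l : List Int) (a : Int) (ha : a ∈ l) :
    ∀ w : Int, a ≤ w → w ≤ a + (C l (a + 1) : Int) →
      (C l (w + 1) : Int) = a + (C l (a + 1) : Int) - w := by
  have hbound : C l (a + 1) < l.length + 1 := by
    have := cnt_lt_length l a ha (l.length + 1); unfold C; omega
  have hend : a + 1 + (C l (a + 1) : Int) ∉ l := by
    have := cnt_next_not_mem l (l.length + 1) (a + 1) hbound
    exact this
  have hmid : ∀ w : Int, a < w → w ≤ a + (C l (a + 1) : Int) → w ∈ l := by
    intro w hw1 hw2
    have hi : (w - a - 1).toNat < C l (a + 1) := by omega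
    have := cnt_mem l (l.length + 1) (a + 1) (w - a - 1).toNat hi
    have harith : a + 1 + ((w - a - 1).toNat : Int) = w := by omega
    rwa [harith] at this
  have main : ∀ (n : Nat) (w : Int), a ≤ w → w ≤ a + (C l (a + 1) : Int) →
      (a + (C l (a + 1) : Int) - w).toNat = n → (C l (w + 1) : Int) = a + (C l (a + 1) : Int) - w := by
    intro n
    induction n with
    | zero =>
      intro w hw1 hw2 hn
      have hwe : w = a + (C l (a + 1) : Int) := by omega
      subst hwe
      rw [C_rec, if_neg (by rwa [show a + (C l (a+1) : Int) + 1 = a + 1 + (C l (a+1) : Int) by ring])]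
      simp
    | succ n ih =>
      intro w hw1 hw2 hn
      have hwlt : w < a + (C l (a + 1) : Int) := by omega
      have hw1mem : w + 1 ∈ l := hmid (w + 1) (by omega) (by omega)
      rw [C_rec, if_pos hw1mem]
      have := ih (w + 1) (by omega) (by omega) (by omega)
      push_cast [this]
      have h2 : (C l (w + 1 + 1) : Int) = a + (C l (a + 1) : Int) - (w + 1) := this
      omega
  intro w hw1 hw2
  exact main (a + (C l (a + 1) : Int) - w).toNat w hw1 hw2 rfl

-- ===== the A side =====
theorem whileA_eq (l : List Int) : ∀ (f : Nat) (base j tM mC : Int),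
    MaxincrementWhile l base j tM mC f =
      (if cnt l (base + j) f = 0 then (tM, mC)
       else (base + j + (cnt l (base + j) f : Int) - 1, j + (cnt l (base + j) f : Int) - 1)) := by
  intro f
  induction f with
  | zero => intro base j tM mC; simp [MaxincrementWhile, cnt]
  | succ f ih =>
    intro base j tM mC
    simp only [MaxincrementWhile, cnt]
    by_cases hc : l.contains (base + j)
    · rw [if_pos hc, if_pos hc, ih base (j + 1) (base + j) j]
      have harg : base + (j + 1) = base + j + 1 := by ring
      rw [harg, if_neg (show ¬(cnt l (base + j + 1) f + 1 = 0) by omega)]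
      by_cases h0 : cnt l (base + j + 1) f = 0
      · rw [if_pos h0, h0]
        simp only [Prod.mk.injEq]
        constructor <;> push_cast <;> ring
      · rw [if_neg h0]
        simp only [Prod.mk.injEq]
        constructor <;> push_cast <;> ring
    · rw [if_neg hc, if_neg hc, if_pos rfl]

def stepA (l : List Int) (st : Int × Int × Int × Int × Int × Int) (v : Int) :
    Int × Int × Int × Int × Int × Int :=
  let r := MaxincrementWhile l v 1 st.2.2.2.1 st.2.2.2.2.1 (l.length + 1)
  if r.2 > st.2.2.2.2.2 then (v, r.1, v, r.1, r.2, r.2)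
  else (st.1, st.2.1, v, r.1, r.2, st.2.2.2.2.2)

theorem stepA_proj (l : List Int) (st : Int × Int × Int × Int × Int × Int) (v : Int)
    (h1 : st.2.2.2.2.1 ≤ st.2.2.2.2.2) (h2 : 0 ≤ st.2.2.2.2.2) :
    ((stepA l st v).1, (stepA l st v).2.1, (stepA l st v).2.2.2.2.2)
        = bestStep l (st.1, st.2.1, st.2.2.2.2.2) v
    ∧ (stepA l st v).2.2.2.2.1 ≤ (stepA l st v).2.2.2.2.2 ∧ 0 ≤ (stepA l st v).2.2.2.2.2 := by
  unfold stepA bestStep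
  rw [whileA_eq l (l.length + 1) v 1 st.2.2.2.1 st.2.2.2.2.1]
  by_cases h0 : cnt l (v + 1) (l.length + 1) = 0
  · rw [if_pos h0, h0]
    simp only
    rw [if_neg (by omega), if_neg (by push_cast; omega)]
    exact ⟨rfl, h1, h2⟩
  · rw [if_neg h0]
    simp only
    have he1 : v + 1 + (cnt l (v + 1) (l.length + 1) : Int) - 1
        = v + (cnt l (v + 1) (l.length + 1) : Int) := by ring
    have he2 : (1 : Int) + (cnt l (v + 1) (l.length + 1) : Int) - 1
        = (cnt l (v + 1) (l.length + 1) : Int) := by ring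
    rw [he1, he2]
    by_cases hgt : (cnt l (v + 1) (l.length + 1) : Int) > st.2.2.2.2.2
    · rw [if_pos hgt, if_pos hgt]
      refine ⟨rfl, le_refl _, ?_⟩
      show (0 : Int) ≤ (cnt l (v + 1) (l.length + 1) : Int)
      positivity
    · rw [if_neg hgt, if_neg hgt]
      refine ⟨rfl, ?_, h2⟩
      show (cnt l (v + 1) (l.length + 1) : Int) ≤ st.2.2.2.2.2
      omega

theorem foldA_eq (l : List Int) : ∀ (xs : List Int) (st : Int × Int × Int × Int × Int × Int),
    st.2.2.2.2.1 ≤ st.2.2.2.2.2 → 0 ≤ st.2.2.2.2.2 →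
    ((xs.foldl (stepA l) st).1, (xs.foldl (stepA l) st).2.1, (xs.foldl (stepA l) st).2.2.2.2.2)
        = xs.foldl (bestStep l) (st.1, st.2.1, st.2.2.2.2.2)
    ∧ (xs.foldl (stepA l) st).2.2.2.2.1 ≤ (xs.foldl (stepA l) st).2.2.2.2.2
    ∧ 0 ≤ (xs.foldl (stepA l) st).2.2.2.2.2 := by
  intro xs
  induction xs with
  | nil => intro st h1 h2; exact ⟨rfl, h1, h2⟩
  | cons v xs ih =>
    intro st h1 h2
    obtain ⟨hproj, hi1, hi2⟩ := stepA_proj l st v h1 h2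
    simp only [List.foldl_cons]
    rw [← hproj]
    exact ih (stepA l st v) hi1 hi2

-- ===== the B side =====
theorem fillRun_get? : ∀ (u e : Int) (d : PySem.Dict Int Int) (w : Int),
    (fillRun u e d).get? w = if u ≤ w ∧ w ≤ e then some (e - w) else d.get? w := by
  intro u e d w
  fun_induction fillRun u e d with
  | case1 u d hle ih =>
    rw [ih, PySem.Dict.get?_insert]
    by_cases hw : w = u
    · subst hw
      rw [if_neg (by omega), if_pos rfl, if_pos (by omega)]
    · rw [if_neg hw]
      by_cases hin : u + 1 ≤ w ∧ w ≤ e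
      · rw [if_pos hin, if_pos (by omega)]
      · rw [if_neg hin, if_neg (by omega)]
  | case2 u d hle =>
    rw [if_neg (by omega)]

theorem contains_ofList_eq (l : List Int) (y : Int) :
    PySem.Set.contains (PySem.Set.ofList l) y = l.contains y := by
  rw [Bool.eq_iff_iff]
  simp [PySem.Set.mem_ofList]

theorem chainEnd_eq (l : List Int) : ∀ (f : Nat) (v : Int),
    chainEnd (PySem.Set.ofList l) v f = v + (cnt l (v + 1) f : Int) := by
  intro f
  induction f with
  | zero => intro v; simp [chainEnd, cnt]
  | succ f ih =>
    intro v
    simp only [chainEnd, cnt, contains_ofList_eq]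
    by_cases hc : l.contains (v + 1)
    · rw [if_pos hc, if_pos hc, ih (v + 1)]
      push_cast; ring
    · rw [if_neg hc, if_neg hc]
      simp

theorem runFold_get? (l : List Int) : ∀ (vs : List Int) (d : PySem.Dict Int Int) (done : Int → Bool),
    (∀ v ∈ vs, v ∈ l) →
    (∀ u ∈ l, d.get? u = (if done (u - (P l u : Int)) then some ((C l (u + 1) : Int)) else none)) →
    ∀ u ∈ l, ((vs.foldl (fun d v =>
        if PySem.Set.contains (PySem.Set.ofList l) (v - 1) then d
        else fillRun v (chainEnd (PySem.Set.ofList l) v (l.length + 1)) d) d).get? u =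
      (if (done (u - (P l u : Int)) || vs.contains (u - (P l u : Int)))
        then some ((C l (u + 1) : Int)) else none)) := by
  intro vs
  induction vs with
  | nil =>
    intro d done _ hd u hu
    simpa using hd u hu
  | cons v vs ih =>
    intro d done hvs hd u hu
    simp only [List.foldl_cons]
    rw [show PySem.Set.contains (PySem.Set.ofList l) (v - 1) = l.contains (v - 1) from
      contains_ofList_eq l (v - 1)]
    by_cases hv1 : l.contains (v - 1)
    · rw [if_pos hv1]
      have hres := ih d done (fun x hx => hvs x (List.mem_cons_of_mem v hx)) hd u hu
      rw [hres]
      obtain ⟨-, ha2, -⟩ := start_facts l u hu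
      have hne : u - (P l u : Int) ≠ v := by
        intro hc
        exact ha2 (by rw [hc]; exact List.mem_of_elem_eq_true hv1)
      congr 1
      rw [List.contains_cons]
      simp [hne]
    · rw [if_neg hv1]
      have hvmem : v ∈ l := hvs v List.mem_cons_self
      have hvnot : v - 1 ∉ l := fun hc => hv1 (by simpa [List.contains_iff_mem] using hc)
      have hCb : C l (v + 1) < l.length + 1 := by
        have := cnt_lt_length l v hvmem (l.length + 1); unfold C; omega
      have hchain : chainEnd (PySem.Set.ofList l) v (l.length + 1) = v + (C l (v + 1) : Int) :=
        chainEnd_eq l (l.length + 1) v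
      rw [hchain]
      have hmid : ∀ w : Int, v ≤ w → w ≤ v + (C l (v + 1) : Int) → w ∈ l := by
        intro w hw1 hw2
        rcases eq_or_lt_of_le hw1 with rfl | hlt
        · exact hvmem
        · have hi : (w - v - 1).toNat < C l (v + 1) := by omega
          have := cnt_mem l (l.length + 1) (v + 1) (w - v - 1).toNat hi
          have harith : v + 1 + ((w - v - 1).toNat : Int) = w := by omega
          rwa [harith] at this
      have hd' : ∀ u ∈ l, (fillRun v (v + (C l (v + 1) : Int)) d).get? u =
          (if (fun y => done y || (y == v)) (u - (P l u : Int))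
            then some ((C l (u + 1) : Int)) else none) := by
        intro u hu
        rw [fillRun_get?]
        obtain ⟨ha1, ha2, ha3⟩ := start_facts l u hu
        by_cases hin : v ≤ u ∧ u ≤ v + (C l (v + 1) : Int)
        · rw [if_pos hin]
          have hP : (P l u : Int) = u - v := by
            have hn := P_chain l v hvnot (u - v).toNat (by
              intro i hi
              exact hmid (v + i) (by omega) (by omega))
            have : v + ((u - v).toNat : Int) = u := by omega
            rw [this] at hn
            omega
          have hcond : u - (P l u : Int) = v := by omega
          rw [hcond]
          simp only [BEq.rfl, Bool.or_true, if_pos]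
          have := C_chain l v hvmem u hin.1 hin.2
          rw [this]
        · rw [if_neg hin]
          have hle : u - (P l u : Int) ≤ u := by omega
          have hne : u - (P l u : Int) ≠ v := by
            intro hc
            apply hin
            have hk : P l u ≤ C l (v + 1) := by
              unfold C
              apply cnt_ge
              · intro i hi
                have : v + 1 + (i : Int) ≤ u := by omega
                exact ha3 (v + 1 + i) (by omega) this
              · have := pcnt_lt_length l u hu (l.length + 1)
                unfold P; omega
            constructor <;> omega
          rw [hd u hu]
          have : ((u - (P l u : Int)) == v) = false := by
            simpa using hne
          simp [this]
      have hres := ih (fillRun v (v + (C l (v + 1) : Int)) d)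
          (fun y => done y || (y == v)) (fun x hx => hvs x (List.mem_cons_of_mem v hx)) hd' u hu
      rw [hres]
      congr 1
      rw [List.contains_cons]
      cases hb1 : done (u - (P l u : Int)) <;> cases hb2 : ((u - (P l u : Int)) == v) <;>
        cases hb3 : vs.contains (u - (P l u : Int)) <;> simp [hb1, hb2]

theorem run_getD (l : List Int) (v : Int) (hv : v ∈ l) :
    (((PySem.Set.ofList l).foldl (fun d v =>
        if PySem.Set.contains (PySem.Set.ofList l) (v - 1) then d
        else fillRun v (chainEnd (PySem.Set.ofList l) v (l.length + 1)) d)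
      PySem.Dict.empty).getD v 0) = (C l (v + 1) : Int) := by
  have hmem : ∀ x ∈ (PySem.Set.ofList l : List Int), x ∈ l := by
    intro x hx; exact (PySem.Set.mem_ofList l x).mp hx
  have hd : ∀ u ∈ l, (PySem.Dict.empty : PySem.Dict Int Int).get? u =
      (if (fun _ : Int => false) (u - (P l u : Int)) then some ((C l (u + 1) : Int)) else none) := by
    intro u _; simp [PySem.Dict.get?_empty]
  have hres := runFold_get? l (PySem.Set.ofList l) PySem.Dict.empty (fun _ => false) hmem hd v hv
  obtain ⟨ha1, -, -⟩ := start_facts l v hv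
  have hmemv : v - (P l v : Int) ∈ (PySem.Set.ofList l : List Int) :=
    (PySem.Set.mem_ofList l _).mpr ha1
  rw [PySem.Dict.getD_eq_get?_getD, hres,
    if_pos (by simpa [List.contains_iff_mem] using hmemv)]
  rfl

-- ===== VERDICT (by name: the statement is the Claim_ definition above) =====
theorem Maxincrement_spec : Claim_equal_Maxincrement := by
  intro l _
  show Maxincrement l = Maxincrement_alt l
  have hfold : l.foldl (fun (st : Int × Int × Int) v =>
        let k := (((PySem.Set.ofList l).foldl (fun d v =>
            if PySem.Set.contains (PySem.Set.ofList l) (v - 1) then d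
            else fillRun v (chainEnd (PySem.Set.ofList l) v (l.length + 1)) d)
          PySem.Dict.empty).getD v 0)
        if k > st.2.2 then (v, v + k, k) else st) ((0:Int),(0:Int),(0:Int))
      = l.foldl (bestStep l) ((0:Int),(0:Int),(0:Int)) := by
    apply PySem.List.foldl_congr_mem
    intro acc x hx
    rw [run_getD l x hx]
    rfl
  obtain ⟨hproj, -, -⟩ := foldA_eq l l ((0:Int),(0:Int),(0:Int),(0:Int),(0:Int),(0:Int))
    (le_refl (0:Int)) (le_refl (0:Int))
  have h1 := congrArg (fun p : Int × Int × Int => p.1) hproj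
  have h2 := congrArg (fun p : Int × Int × Int => p.2.1) hproj
  simp only at h1 h2
  calc Maxincrement l
      = [(l.foldl (stepA l) ((0:Int),(0:Int),(0:Int),(0:Int),(0:Int),(0:Int))).1,
         (l.foldl (stepA l) ((0:Int),(0:Int),(0:Int),(0:Int),(0:Int),(0:Int))).2.1] := by
        show [((PySem.List.pyRange 0 (PySem.List.len l) 1).foldl
              (fun acc j => stepA l acc (PySem.List.pyGetD l j (0:Int)))
              ((0:Int),(0:Int),(0:Int),(0:Int),(0:Int),(0:Int))).1,
            ((PySem.List.pyRange 0 (PySem.List.len l) 1).foldl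
              (fun acc j => stepA l acc (PySem.List.pyGetD l j (0:Int)))
              ((0:Int),(0:Int),(0:Int),(0:Int),(0:Int),(0:Int))).2.1] = _
        rw [PySem.List.foldl_pyRange_zero_pyGetD l (0:Int) (stepA l)]
    _ = [(l.foldl (bestStep l) ((0:Int),(0:Int),(0:Int))).1,
         (l.foldl (bestStep l) ((0:Int),(0:Int),(0:Int))).2.1] := by rw [h1, h2]
    _ = Maxincrement_alt l := by
        show _ = [(l.foldl (fun (st : Int × Int × Int) v =>
              let k := (((PySem.Set.ofList l).foldl (fun d v =>
                  if PySem.Set.contains (PySem.Set.ofList l) (v - 1) then d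
                  else fillRun v (chainEnd (PySem.Set.ofList l) v (l.length + 1)) d)
                PySem.Dict.empty).getD v 0)
              if k > st.2.2 then (v, v + k, k) else st) ((0:Int),(0:Int),(0:Int))).1,
            (l.foldl (fun (st : Int × Int × Int) v =>
              let k := (((PySem.Set.ofList l).foldl (fun d v =>
                  if PySem.Set.contains (PySem.Set.ofList l) (v - 1) then d
                  else fillRun v (chainEnd (PySem.Set.ofList l) v (l.length + 1)) d)
                PySem.Dict.empty).getD v 0)
              if k > st.2.2 then (v, v + k, k) else st) ((0:Int),(0:Int),(0:Int))).2.1]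
        rw [hfold]
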